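-- pv_equiv track=rewrite | github.com/cloudyear/oa | q2.py | health_subsequence
-- ===== SOURCE A (Python) =====
-- from collections import defaultdict
--
-- def health_subsequence(A, m):
--     mod_dict = defaultdict(list)
--     for i in A:
--         mod_dict[i%m].append(i)
--     mod_dict = sorted(mod_dict.values(), key=lambda x:len(x), reverse=True)
--     # tmp_idx = 0
--     # for i in range(len(mod_dict)):
--     #     tmp_idx = i
--     #     if len(mod_dict[i]) != len(mod_dict[0]):
--     #         break ? can pass [13,43,34,1,73,-20,73,-8,17]
--     # mod_dict = mod_dict[:tmp_idx + 1]
--     max_len = len(max(mod_dict, key=lambda x: len(x)))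
--     new_mod_list = []
--     for i in mod_dict:
--         if len(i) == max_len:
--             new_mod_list.append(i)
--     new_mod_list = sorted(new_mod_list, key=lambda x: min(x))
--     return new_mod_list[0]
-- ===== SOURCE B (Python) =====
-- def health_subsequence(A, m):
--     # one pass: residue -> (count, running min); then pick best residue; then collect
--     info = {}
--     for x in A:
--         r = x % m
--         if r in info:
--             c, mn = info[r]
--             info[r] = (c + 1, mn if mn < x else x)
--         else:
--             info[r] = (1, x)
--     best = None
--     for r, (c, mn) in info.items():
--         if best is None or c > best[1] or (c == best[1] and mn < best[2]):
--             best = (r, c, mn)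
--     return [x for x in A if x % m == best[0]]
-- ===== Notes on version B (the rewrite author's own statement) =====
-- stated objective: simpler
-- what changed: Instead of materialising all residue groups and sorting them twice (by length desc, then by min), B keeps only a (count, running-min) summary per residue in one pass, selects the best residue by a single linear scan (count desc, min asc), and collects that residue's elements in a second pass over A.
import Mathlib
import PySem

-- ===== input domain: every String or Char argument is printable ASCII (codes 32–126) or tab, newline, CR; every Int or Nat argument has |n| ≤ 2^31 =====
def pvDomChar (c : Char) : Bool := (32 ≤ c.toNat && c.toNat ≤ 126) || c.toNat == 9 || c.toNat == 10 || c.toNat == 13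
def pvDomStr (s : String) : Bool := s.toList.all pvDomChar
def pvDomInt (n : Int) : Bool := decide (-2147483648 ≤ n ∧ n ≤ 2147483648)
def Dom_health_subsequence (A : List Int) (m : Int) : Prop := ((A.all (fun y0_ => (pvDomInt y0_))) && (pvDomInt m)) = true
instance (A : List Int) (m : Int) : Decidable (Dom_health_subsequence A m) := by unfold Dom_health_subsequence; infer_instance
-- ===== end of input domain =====

-- B replaces A's build-all-groups-then-sort-twice pipeline by a one-pass (count, min) summary per
-- residue, a linear best-residue scan, and a collecting second pass (objective: simpler).

-- ===== PORT A =====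
def health_subsequence (A : List Int) (m : Int) : List Int :=
  -- mod_dict = defaultdict(list); for i in A: mod_dict[i%m].append(i)
  let d := A.foldl (fun d i => d.modify (PySem.Int.mod i m) [] (fun l => l ++ [i])) PySem.Dict.empty
  -- mod_dict = sorted(mod_dict.values(), key=len, reverse=True)
  let modList := PySem.List.sorted d.values (fun x => x.length) true
  -- max_len = len(max(mod_dict, key=len)); Python max() raises ValueError on empty A — excluded by Pre_
  match PySem.List.max? modList (fun x => x.length) with
  | none => []
  | some mx =>
    let maxLen := mx.length
    let newModList := modList.foldl (fun acc i => if i.length = maxLen then acc ++ [i] else acc) []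
    -- new_mod_list = sorted(new_mod_list, key=min); every group is nonempty, so min's default 0 is never used
    let sortedNew := PySem.List.sorted newModList (fun x => PySem.List.minD x (fun y => y) 0) false
    -- return new_mod_list[0]; the list is nonempty here, so IndexError cannot occur
    (PySem.List.pyGet? sortedNew 0).getD []

-- ===== PORT B =====
def health_subsequence_alt (A : List Int) (m : Int) : List Int :=
  -- info: residue -> (count, running min), one pass
  let info := A.foldl (fun d x =>
      let r := PySem.Int.mod x m
      match d.get? r with
      | some (c, mn) => d.insert r (c + 1, if mn < x then mn else x)
      | none => d.insert r ((1 : Int), x)) PySem.Dict.empty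
  -- best = (residue, count, min) maximal by count, ties by smaller min
  let best := info.items.foldl (fun best p =>
      match best with
      | none => some (p.1, p.2.1, p.2.2)
      | some (br, bc, bmn) =>
        if p.2.1 > bc ∨ (p.2.1 = bc ∧ p.2.2 < bmn) then some (p.1, p.2.1, p.2.2)
        else some (br, bc, bmn)) none
  match best with
  | none => []   -- empty A: Python B raises here (best is None) — excluded by Pre_
  | some (br, _, _) => A.filter (fun x => PySem.Int.mod x m == br)

-- ===== PRECONDITION & SPEC =====
-- Pre_ excludes exactly the inputs where Python A raises: empty A (ValueError from max())
-- and m = 0 (ZeroDivisionError from i % m).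
def Pre_health_subsequence (A : List Int) (m : Int) : Prop := A ≠ [] ∧ m ≠ 0
instance (A : List Int) (m : Int) : Decidable (Pre_health_subsequence A m) := by
  unfold Pre_health_subsequence; infer_instance

def pvWitness_health_subsequence : List Int × Int := ([13, 43, 34, 1, 73, -20, 73, -8, 17], 7)

def Spec_health_subsequence (A : List Int) (m : Int) (out : List Int) : Prop :=
  out = health_subsequence_alt A m
instance (A : List Int) (m : Int) (out : List Int) : Decidable (Spec_health_subsequence A m out) := by
  unfold Spec_health_subsequence; infer_instance

-- ===== CLAIM (what is proved, stated in full; the proofs are below) =====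
def Claim_equal_health_subsequence : Prop := ∀ (A : List Int) (m : Int),
  Dom_health_subsequence A m → Pre_health_subsequence A m →
  Spec_health_subsequence A m (health_subsequence A m)

-- ===== LEMMAS AND PROOFS =====

-- the residue group of r: elements of A congruent to r, in order
def pvG (A : List Int) (m r : Int) : List Int := A.filter (fun x => PySem.Int.mod x m == r)
-- the residues, in first-occurrence order
def pvKs (A : List Int) (m : Int) : List Int := PySem.Set.ofList (A.map (fun x => PySem.Int.mod x m))
-- A's grouping dict
def pvDA (A : List Int) (m : Int) : PySem.Dict Int (List Int) :=
  A.foldl (fun d i => d.modify (PySem.Int.mod i m) [] (fun l => l ++ [i])) PySem.Dict.empty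
-- B's summary dict step
def pvStepB (m : Int) (d : PySem.Dict Int (Int × Int)) (x : Int) : PySem.Dict Int (Int × Int) :=
  let r := PySem.Int.mod x m
  match d.get? r with
  | some (c, mn) => d.insert r (c + 1, if mn < x then mn else x)
  | none => d.insert r ((1 : Int), x)
def pvDB (A : List Int) (m : Int) : PySem.Dict Int (Int × Int) :=
  A.foldl (pvStepB m) PySem.Dict.empty
-- the (count, min) summary of a group
def pvSummary : List Int → Option (Int × Int)
  | [] => none
  | h :: t => some (((h :: t).length : Int), t.foldl min h)
-- B's selection step
def pvSel (b : Option (Int × Int × Int)) (p : Int × Int × Int) : Option (Int × Int × Int) :=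
  match b with
  | none => some (p.1, p.2.1, p.2.2)
  | some (br, bc, bmn) =>
    if p.2.1 > bc ∨ (p.2.1 = bc ∧ p.2.2 < bmn) then some (p.1, p.2.1, p.2.2)
    else some (br, bc, bmn)
def pvBetter (p b : Int × Int × Int) : Prop := p.2.1 > b.2.1 ∨ (p.2.1 = b.2.1 ∧ p.2.2 < b.2.2)

lemma pvPortA_eq (A : List Int) (m : Int) : health_subsequence A m =
    (match PySem.List.max? (PySem.List.sorted (pvDA A m).values (fun x => x.length) true)
        (fun x => x.length) with
    | none => []
    | some mx =>
      (PySem.List.pyGet?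
        (PySem.List.sorted
          ((PySem.List.sorted (pvDA A m).values (fun x => x.length) true).foldl
            (fun acc i => if i.length = mx.length then acc ++ [i] else acc) [])
          (fun x => PySem.List.minD x (fun y => y) 0) false) 0).getD []) := rfl

lemma pvPortB_eq (A : List Int) (m : Int) : health_subsequence_alt A m =
    (match (pvDB A m).items.foldl pvSel none with
    | none => []
    | some (br, _, _) => A.filter (fun x => PySem.Int.mod x m == br)) := rfl

lemma pvKeys_DA (A : List Int) (m : Int) : (pvDA A m).keys = pvKs A m := by
  unfold pvDA pvKs
  rw [PySem.Dict.keys_foldl_modify_key A (fun x => PySem.Int.mod x m) []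
      (fun _ x => fun l => l ++ [x]) PySem.Dict.empty]
  rw [PySem.Dict.keys_empty, PySem.Set.update_nil_left]

lemma pvNodup_DA (A : List Int) (m : Int) : (pvDA A m).keys.Nodup := by
  unfold pvDA
  exact PySem.Dict.nodup_keys_foldl_modify_key A (fun x => PySem.Int.mod x m) []
    (fun _ x => fun l => l ++ [x]) PySem.Dict.empty PySem.Dict.nodup_keys_empty

lemma pvGetD_DA (A : List Int) (m r : Int) : (pvDA A m).getD r [] = pvG A m r := by
  unfold pvDA pvG
  have hmap : (A.foldl (fun d i => d.modify (PySem.Int.mod i m) [] (fun l => l ++ [i]))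
      PySem.Dict.empty)
      = ((A.map (fun x => (PySem.Int.mod x m, x))).foldl
          (fun d p => d.modify p.1 [] (fun l => l ++ [p.2])) PySem.Dict.empty) := by
    rw [List.foldl_map]
  rw [hmap, PySem.Dict.getD_foldl_modify_append]
  simp [List.filter_map, List.map_map, Function.comp_def]

lemma pvItems_DA (A : List Int) (m : Int) :
    (pvDA A m).items = (pvKs A m).map (fun r => (r, pvG A m r)) := by
  rw [PySem.Dict.items_eq_map_keys (pvDA A m) (pvNodup_DA A m) [], pvKeys_DA]
  exact List.map_congr_left (fun r _ => by rw [pvGetD_DA])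

lemma pvValues_DA (A : List Int) (m : Int) :
    (pvDA A m).values = (pvKs A m).map (fun r => pvG A m r) := by
  have h : (pvDA A m).values = (pvDA A m).items.map (fun p => p.2) := by
    simp [PySem.Dict.values]
  rw [h, pvItems_DA, List.map_map]
  simp [Function.comp_def]

lemma pvMem_Ks (A : List Int) (m r : Int) :
    r ∈ pvKs A m ↔ ∃ x ∈ A, PySem.Int.mod x m = r := by
  unfold pvKs
  rw [PySem.Set.mem_ofList]
  simp

lemma pvMem_G (A : List Int) (m r x : Int) :
    x ∈ pvG A m r ↔ x ∈ A ∧ PySem.Int.mod x m = r := by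
  unfold pvG
  rw [List.mem_filter]
  simp

lemma pvG_ne_nil (A : List Int) (m r : Int) (h : r ∈ pvKs A m) : pvG A m r ≠ [] := by
  obtain ⟨x, hx, hmod⟩ := (pvMem_Ks A m r).mp h
  exact List.ne_nil_of_mem ((pvMem_G A m r x).mpr ⟨hx, hmod⟩)

-- B's dict maps each residue to (count, running min) of its group
lemma pvGet_DB (A : List Int) (m : Int) : ∀ r, (pvDB A m).get? r = pvSummary (pvG A m r) := by
  induction A using List.reverseRecOn with
  | nil => intro r; simp [pvDB, pvG, pvSummary, PySem.Dict.get?_empty]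
  | append_singleton l x ih =>
    intro r
    have hfold : pvDB (l ++ [x]) m = pvStepB m (pvDB l m) x := by
      simp [pvDB, List.foldl_append]
    have hG : ∀ s, pvG (l ++ [x]) m s
        = pvG l m s ++ (if (PySem.Int.mod x m == s) = true then [x] else []) := by
      intro s
      simp only [pvG, List.filter_append]
      congr 1
      cases hbb : (PySem.Int.mod x m == s) <;> simp [List.filter, hbb]
    by_cases hr : r = PySem.Int.mod x m
    · subst hr
      rw [hfold, hG]
      simp only [BEq.rfl, if_pos]
      cases hGl : pvG l m (PySem.Int.mod x m) with
      | nil =>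
        have hget := ih (PySem.Int.mod x m)
        rw [hGl] at hget
        simp [pvStepB, hget, pvSummary, PySem.Dict.get?_insert_self]
      | cons h t =>
        have hget := ih (PySem.Int.mod x m)
        rw [hGl] at hget
        simp only [pvSummary] at hget
        simp only [pvStepB, hget, PySem.Dict.get?_insert_self]
        simp only [pvSummary, List.cons_append, List.foldl_append, List.foldl_cons,
          List.foldl_nil, List.length_cons, List.length_append]
        simp only [Option.some.injEq, Prod.mk.injEq]
        refine ⟨by simp only [List.length_nil]; push_cast; omega, ?_⟩
        rcases lt_trichotomy (List.foldl min h t) x with hlt | heq | hgt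
        · rw [if_pos hlt, min_def, if_pos (le_of_lt hlt)]
        · rw [if_neg (by omega), min_def, if_pos (le_of_eq heq)]; omega
        · rw [if_neg (by omega), min_def, if_neg (by omega)]
    · rw [hfold, hG]
      have hbeq : (PySem.Int.mod x m == r) = false := by
        simp; exact fun h => hr h.symm
      rw [hbeq]
      simp only [if_neg Bool.false_ne_true, List.append_nil]
      have hne : r ≠ PySem.Int.mod x m := hr
      unfold pvStepB
      cases hg : (pvDB l m).get? (PySem.Int.mod x m) with
      | none => simp only [hg]; rw [PySem.Dict.get?_insert_of_ne _ _ hne, ih]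
      | some p =>
        obtain ⟨c, mn⟩ := p
        simp only [hg]; rw [PySem.Dict.get?_insert_of_ne _ _ hne, ih]

lemma pvStepB_insert_shape (m : Int) : pvStepB m = (fun d x =>
    d.insert (PySem.Int.mod x m)
      (match d.get? (PySem.Int.mod x m) with
      | some (c, mn) => (c + 1, if mn < x then mn else x)
      | none => ((1 : Int), x))) := by
  funext d x
  unfold pvStepB
  cases hg : d.get? (PySem.Int.mod x m) with
  | none => simp [hg]
  | some p => obtain ⟨c, mn⟩ := p; simp [hg]

lemma pvKeys_DB (A : List Int) (m : Int) : (pvDB A m).keys = pvKs A m := by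
  unfold pvDB pvKs
  rw [pvStepB_insert_shape]
  rw [PySem.Dict.keys_foldl_insert_key A (fun x => PySem.Int.mod x m) _ PySem.Dict.empty]
  rw [PySem.Dict.keys_empty, PySem.Set.update_nil_left]

lemma pvNodup_DB (A : List Int) (m : Int) : (pvDB A m).keys.Nodup := by
  unfold pvDB
  rw [pvStepB_insert_shape]
  exact PySem.Dict.nodup_keys_foldl_insert_key A (fun x => PySem.Int.mod x m) _
    PySem.Dict.empty PySem.Dict.nodup_keys_empty

lemma pvItems_DB (A : List Int) (m : Int) :
    (pvDB A m).items = (pvKs A m).map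
      (fun r => (r, (((pvG A m r).length : Int), PySem.List.minD (pvG A m r) (fun y => y) 0))) := by
  rw [PySem.Dict.items_eq_map_keys (pvDB A m) (pvNodup_DB A m) ((0 : Int), (0 : Int)), pvKeys_DB]
  apply List.map_congr_left
  intro r hr
  have hne := pvG_ne_nil A m r hr
  cases hGl : pvG A m r with
  | nil => exact absurd hGl hne
  | cons h t =>
    rw [PySem.Dict.getD_eq_get?_getD, pvGet_DB, hGl]
    simp [pvSummary, PySem.List.minD_id_cons]

-- selection-fold lemmas
lemma pvBetter_chain (q a b : Int × Int × Int) (h1 : ¬ pvBetter q a)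
    (h2 : b = a ∨ pvBetter b a) : ¬ pvBetter q b := by
  simp only [pvBetter] at *
  rcases h2 with rfl | h2 <;> omega

lemma pvSel_improve : ∀ (L : List (Int × Int × Int)) (acc : Option (Int × Int × Int))
    (b : Int × Int × Int), L.foldl pvSel acc = some b →
    ∀ a, acc = some a → b = a ∨ pvBetter b a := by
  intro L
  induction L with
  | nil =>
    intro acc b hf a ha
    rw [List.foldl_nil] at hf; rw [ha] at hf
    left; exact (Option.some.inj hf).symm
  | cons q t ih =>
    intro acc b hf a ha
    subst ha
    obtain ⟨q1, q2, q3⟩ := q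
    obtain ⟨a1, a2, a3⟩ := a
    rw [List.foldl_cons] at hf
    simp only [pvSel] at hf
    by_cases hc : ((q1, q2, q3) : Int × Int × Int).2.1 > a2 ∨
        (((q1, q2, q3) : Int × Int × Int).2.1 = a2 ∧ ((q1, q2, q3) : Int × Int × Int).2.2 < a3)
    · rw [if_pos hc] at hf
      simp only at hc
      rcases ih _ b hf _ rfl with rfl | hb
      · right; simp only [pvBetter]; simpa using hc
      · right; simp only [pvBetter] at *; omega
    · rw [if_neg hc] at hf
      exact ih _ b hf _ rfl

lemma pvSel_notBetter : ∀ (L : List (Int × Int × Int)) (acc : Option (Int × Int × Int))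
    (b : Int × Int × Int), L.foldl pvSel acc = some b →
    ∀ p ∈ L, ¬ pvBetter p b := by
  intro L
  induction L with
  | nil => intro acc b _ p hp; simp at hp
  | cons q t ih =>
    intro acc b hf p hp
    rw [List.foldl_cons] at hf
    rcases List.mem_cons.mp hp with rfl | hpt
    · -- p = q: after this step the accumulator is at least as good as q
      obtain ⟨q1, q2, q3⟩ := p
      cases acc with
      | none =>
        have hstep : pvSel none (q1, q2, q3) = some (q1, q2, q3) := rfl
        rw [hstep] at hf
        have := pvSel_improve t _ b hf _ rfl
        exact pvBetter_chain _ _ _ (by simp only [pvBetter]; omega) this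
      | some a =>
        obtain ⟨a1, a2, a3⟩ := a
        simp only [pvSel] at hf
        by_cases hc : ((q1, q2, q3) : Int × Int × Int).2.1 > a2 ∨
            (((q1, q2, q3) : Int × Int × Int).2.1 = a2 ∧ ((q1, q2, q3) : Int × Int × Int).2.2 < a3)
        · rw [if_pos hc] at hf
          have := pvSel_improve t _ b hf _ rfl
          exact pvBetter_chain _ _ _ (by simp only [pvBetter]; omega) this
        · rw [if_neg hc] at hf
          have := pvSel_improve t _ b hf _ rfl
          refine pvBetter_chain _ _ _ ?_ this
          simp only at hc
          simp only [pvBetter]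
          omega
    · exact ih _ b hf p hpt

lemma pvSel_mem : ∀ (L : List (Int × Int × Int)) (acc : Option (Int × Int × Int))
    (b : Int × Int × Int), L.foldl pvSel acc = some b → acc = some b ∨ b ∈ L := by
  intro L
  induction L with
  | nil => intro acc b hf; left; exact hf
  | cons q t ih =>
    intro acc b hf
    rw [List.foldl_cons] at hf
    rcases ih _ b hf with h | h
    · obtain ⟨q1, q2, q3⟩ := q
      cases acc with
      | none =>
        have hstep : pvSel none (q1, q2, q3) = some (q1, q2, q3) := rfl
        rw [hstep] at h
        right; rw [← Option.some.inj h]; exact List.mem_cons_self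
      | some a =>
        obtain ⟨a1, a2, a3⟩ := a
        simp only [pvSel] at h
        by_cases hc : ((q1, q2, q3) : Int × Int × Int).2.1 > a2 ∨
            (((q1, q2, q3) : Int × Int × Int).2.1 = a2 ∧ ((q1, q2, q3) : Int × Int × Int).2.2 < a3)
        · rw [if_pos hc] at h
          right; rw [← Option.some.inj h]; exact List.mem_cons_self
        · rw [if_neg hc] at h
          left; rw [← Option.some.inj h]
    · right; exact List.mem_cons_of_mem q h

lemma pvSel_some : ∀ (L : List (Int × Int × Int)) (a : Int × Int × Int),
    L.foldl pvSel (some a) ≠ none := by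
  intro L
  induction L with
  | nil => intro a h; rw [List.foldl_nil] at h; exact Option.some_ne_none a h
  | cons q t ih =>
    intro a
    rw [List.foldl_cons]
    obtain ⟨q1, q2, q3⟩ := q
    obtain ⟨a1, a2, a3⟩ := a
    simp only [pvSel]
    by_cases hc : ((q1, q2, q3) : Int × Int × Int).2.1 > a2 ∨
        (((q1, q2, q3) : Int × Int × Int).2.1 = a2 ∧ ((q1, q2, q3) : Int × Int × Int).2.2 < a3)
    · rw [if_pos hc]; exact ih _
    · rw [if_neg hc]; exact ih _

lemma pvSel_ne_none (L : List (Int × Int × Int)) (hL : L ≠ []) :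
    L.foldl pvSel none ≠ none := by
  cases L with
  | nil => exact absurd rfl hL
  | cons q t =>
    rw [List.foldl_cons]
    obtain ⟨q1, q2, q3⟩ := q
    exact pvSel_some t _

-- the minimum of a nonempty group determines its residue
lemma pvMin_resid (A : List Int) (m r : Int) (hr : r ∈ pvKs A m) :
    PySem.Int.mod (PySem.List.minD (pvG A m r) (fun y => y) 0) m = r := by
  have hne := pvG_ne_nil A m r hr
  have hmem := PySem.List.minD_mem (pvG A m r) (fun y => y) 0 hne
  exact ((pvMem_G A m r _).mp hmem).2

theorem health_subsequence_spec_aux (A : List Int) (m : Int) (hA : A ≠ []) :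
    health_subsequence A m = health_subsequence_alt A m := by
  rw [pvPortA_eq, pvPortB_eq]
  -- residues are nonempty
  have hKs : pvKs A m ≠ [] := by
    cases A with
    | nil => exact absurd rfl hA
    | cons a t =>
      have : PySem.Int.mod a m ∈ pvKs (a :: t) m :=
        (pvMem_Ks _ m _).mpr ⟨a, List.mem_cons_self, rfl⟩
      exact List.ne_nil_of_mem this
  -- A side: the sorted values list is nonempty
  have hvals : (pvDA A m).values = (pvKs A m).map (fun r => pvG A m r) := pvValues_DA A m
  set modList := PySem.List.sorted (pvDA A m).values (fun x => x.length) true with hmodList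
  have hmodne : modList ≠ [] := by
    rw [hmodList, Ne, PySem.List.sorted_eq_nil_iff, hvals, List.map_eq_nil_iff]
    exact hKs
  cases hmx : PySem.List.max? modList (fun x => x.length) with
  | none => exact absurd ((PySem.List.max?_eq_none_iff _ _).mp hmx) hmodne
  | some mx =>
    -- B side: the selection fold returns some best triple
    have hitems : (pvDB A m).items = (pvKs A m).map
        (fun r => (r, (((pvG A m r).length : Int),
          PySem.List.minD (pvG A m r) (fun y => y) 0))) := pvItems_DB A m
    have hitemsne : (pvDB A m).items ≠ [] := by
      rw [hitems, Ne, List.map_eq_nil_iff]; exact hKs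
    cases hb : (pvDB A m).items.foldl pvSel none with
    | none => exact absurd hb (pvSel_ne_none _ hitemsne)
    | some b =>
      obtain ⟨rb, cb, mnb⟩ := b
      dsimp only
      -- b comes from the items list: it is a residue with its true count and min
      have hbmem : ((rb, cb, mnb) : Int × Int × Int) ∈ (pvDB A m).items := by
        rcases pvSel_mem _ none _ hb with h | h
        · exact absurd h.symm (Option.some_ne_none _)
        · exact h
      rw [hitems] at hbmem
      obtain ⟨rb', hrb'Ks, hrb'eq⟩ := List.mem_map.mp hbmem
      have hr1 : rb' = rb := congrArg Prod.fst hrb'eq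
      have hcb : ((pvG A m rb').length : Int) = cb := by
        have := congrArg (fun p : Int × Int × Int => p.2.1) hrb'eq; simpa using this
      have hmnb : PySem.List.minD (pvG A m rb') (fun y => y) 0 = mnb := by
        have := congrArg (fun p : Int × Int × Int => p.2.2) hrb'eq; simpa using this
      -- A side: the head of the final sorted list
      have hmxlen : ∀ y ∈ modList, y.length ≤ mx.length := PySem.List.max?_isMax hmx
      have hmxmem : mx ∈ modList := PySem.List.max?_mem hmx
      have hfilter : modList.foldl
          (fun acc i => if i.length = mx.length then acc ++ [i] else acc) []
          = modList.filter (fun i => decide (i.length = mx.length)) := by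
        have := PySem.List.foldl_append_ite
          (fun i : List Int => i.length = mx.length) (fun i => i) modList []
        simpa using this
      rw [hfilter]
      set newList := modList.filter (fun i => decide (i.length = mx.length)) with hnewList
      have hmxnew : mx ∈ newList := by
        rw [hnewList, List.mem_filter]
        exact ⟨hmxmem, by simp⟩
      have hnewne : newList ≠ [] := List.ne_nil_of_mem hmxnew
      cases hsorted : PySem.List.sorted newList (fun x => PySem.List.minD x (fun y => y) 0) false with
      | nil => exact absurd ((PySem.List.sorted_eq_nil_iff _ _ _).mp hsorted) hnewne
      | cons h t =>
        have hhead : ∀ y ∈ newList,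
            PySem.List.minD h (fun y => y) 0 ≤ PySem.List.minD y (fun y => y) 0 :=
          PySem.List.key_head_sorted_le newList _ hsorted
        have hhmem : h ∈ newList := by
          have : h ∈ PySem.List.sorted newList (fun x => PySem.List.minD x (fun y => y) 0) false := by
            rw [hsorted]; exact List.mem_cons_self
          exact (PySem.List.mem_sorted _ _ _ _).mp this
        -- identify h as a group
        have hhmod : h ∈ modList := (List.mem_filter.mp hhmem).1
        have hhlen : h.length = mx.length := by
          have := (List.mem_filter.mp hhmem).2; simpa using this
        have hhvals : h ∈ (pvDA A m).values := (PySem.List.mem_sorted _ _ _ _).mp hhmod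
        rw [hvals] at hhvals
        obtain ⟨rh, hrhKs, hrheq⟩ := List.mem_map.mp hhvals
        -- b dominates the residue rh
        have hnotb : ¬ pvBetter (rh, (((pvG A m rh).length : Int),
            PySem.List.minD (pvG A m rh) (fun y => y) 0)) (rb, cb, mnb) := by
          apply pvSel_notBetter _ none _ hb
          rw [hitems]
          exact List.mem_map.mpr ⟨rh, hrhKs, rfl⟩
        simp only [pvBetter] at hnotb
        -- G rb' is among the values, hence its length is at most the max length
        have hGrbvals : pvG A m rb' ∈ (pvDA A m).values := by
          rw [hvals]; exact List.mem_map.mpr ⟨rb', hrb'Ks, rfl⟩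
        have hGrbmod : pvG A m rb' ∈ modList := (PySem.List.mem_sorted _ _ _ _).mpr hGrbvals
        have hGrble : (pvG A m rb').length ≤ mx.length := hmxlen _ hGrbmod
        -- lengths: |G rh| = |h| = maxLen and cb = |G rb'| ≤ maxLen ≤ cb
        have hlenrh : (pvG A m rh).length = mx.length := by rw [hrheq, hhlen]
        have hcbeq : (pvG A m rb').length = mx.length := by omega
        -- G rb' is in the filtered list, so min h ≤ mnb
        have hGrbnew : pvG A m rb' ∈ newList := by
          rw [hnewList, List.mem_filter]
          exact ⟨hGrbmod, by simp [hcbeq]⟩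
        have hminle : PySem.List.minD h (fun y => y) 0 ≤ mnb := by
          rw [← hmnb]; exact hhead _ hGrbnew
        -- domination on equal counts: mnb ≤ min h
        have hminrh : PySem.List.minD (pvG A m rh) (fun y => y) 0
            = PySem.List.minD h (fun y => y) 0 := by rw [hrheq]
        have hminge : mnb ≤ PySem.List.minD h (fun y => y) 0 := by
          rw [← hminrh]; omega
        have hmineq : PySem.List.minD h (fun y => y) 0 = mnb := le_antisymm hminle hminge
        -- equal minima force equal residues
        have hrh_res : PySem.Int.mod (PySem.List.minD (pvG A m rh) (fun y => y) 0) m = rh :=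
          pvMin_resid A m rh hrhKs
        have hrb_res : PySem.Int.mod (PySem.List.minD (pvG A m rb') (fun y => y) 0) m = rb' :=
          pvMin_resid A m rb' hrb'Ks
        have hreq : rh = rb' := by
          rw [← hrh_res, ← hrb_res, hminrh, hmineq, ← hmnb]
        -- finish: the returned head equals B's collected group
        have hget : (PySem.List.pyGet? (h :: t) 0).getD [] = h := by
          simp [PySem.List.pyGet?, PySem.List.pyIdx?]
        rw [hget, ← hrheq, hreq, hr1]
        rfl

-- ===== VERDICT (by name: the statement is the Claim_ definition above) =====
theorem health_subsequence_spec : Claim_equal_health_subsequence := by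
  unfold Claim_equal_health_subsequence
  intro A m _hdom hpre
  unfold Spec_health_subsequence
  exact health_subsequence_spec_aux A m hpre.1
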